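-- pv_equiv track=rewrite | github.com/wassimmho/python-offensive-tool | games/crate_rush/Network_Needs/Client.py | rate_cpu
-- ===== SOURCE A (Python) =====
-- def rate_cpu(cpu_info):
--     """Rate CPU performance on a scale of 1-10"""
--     cpu_name = cpu_info.get('brand_raw', '').lower()
--
--     # High-end CPUs (8-10)
--     if any(x in cpu_name for x in ['ryzen 9', 'threadripper', 'i9', 'xeon', 'epyc']):
--         return 10
--     elif any(x in cpu_name for x in ['ryzen 7', 'i7']):
--         return 8
--
--     # Mid-range CPUs (5-7)
--     elif any(x in cpu_name for x in ['ryzen 5', 'i5']):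
--         return 6
--     elif any(x in cpu_name for x in ['ryzen 3', 'i3']):
--         return 5
--
--     # Low-end CPUs (2-4)
--     elif any(x in cpu_name for x in ['pentium', 'celeron', 'athlon']):
--         return 3
--     elif any(x in cpu_name for x in ['atom', 'sempron']):
--         return 2
--
--     # Default for unknown CPUs
--     return 5
-- ===== SOURCE B (Python) =====
-- # Flat substring->score map; the rating is the MAXIMUM score over all matching
-- # substrings (default 5 if none match). Correct because A's tiers carry strictly
-- # decreasing scores, so the first matching tier is exactly the highest-scoring match.
-- CPU_SCORES = {
--     'ryzen 9': 10, 'threadripper': 10, 'i9': 10, 'xeon': 10, 'epyc': 10,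
--     'ryzen 7': 8, 'i7': 8,
--     'ryzen 5': 6, 'i5': 6,
--     'ryzen 3': 5, 'i3': 5,
--     'pentium': 3, 'celeron': 3, 'athlon': 3,
--     'atom': 2, 'sempron': 2,
-- }
--
-- def rate_cpu(cpu_info):
--     cpu_name = cpu_info.get('brand_raw', '').lower()
--     return max((score for sub, score in CPU_SCORES.items() if sub in cpu_name), default=5)
-- ===== Notes on version B (the rewrite author's own statement) =====
-- stated objective: alternative
-- what changed: Replaces A's ordered if/elif first-match cascade by a flat substring-to-score map and an unordered maximum over all matching substrings (default 5); this is equivalent because the tier scores are strictly decreasing, so the first matching tier always carries the highest matching score.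
import Mathlib
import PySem

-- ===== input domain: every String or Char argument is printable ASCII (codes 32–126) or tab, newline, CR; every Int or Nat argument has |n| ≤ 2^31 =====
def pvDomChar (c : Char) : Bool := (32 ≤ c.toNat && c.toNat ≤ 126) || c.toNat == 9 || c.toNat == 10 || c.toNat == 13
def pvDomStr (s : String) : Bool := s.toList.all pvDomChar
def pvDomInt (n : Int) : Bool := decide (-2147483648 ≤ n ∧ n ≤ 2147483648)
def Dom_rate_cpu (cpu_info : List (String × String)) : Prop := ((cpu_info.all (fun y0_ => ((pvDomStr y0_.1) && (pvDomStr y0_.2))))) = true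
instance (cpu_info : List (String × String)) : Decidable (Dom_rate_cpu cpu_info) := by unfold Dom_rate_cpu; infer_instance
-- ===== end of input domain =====

-- B replaces A's ordered first-match cascade by a flat substring→score map and an unordered
-- maximum over all matches (default 5); equivalent because tier scores strictly decrease.

-- ===== PORT A =====
def rate_cpu (cpu_info : List (String × String)) : Int :=
  let cpu_name := PySem.Str.lower (PySem.Dict.getD (PySem.Dict.mk cpu_info) "brand_raw" "")
  if (["ryzen 9", "threadripper", "i9", "xeon", "epyc"].any fun x => PySem.Str.isIn x cpu_name) then 10
  else if (["ryzen 7", "i7"].any fun x => PySem.Str.isIn x cpu_name) then 8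
  else if (["ryzen 5", "i5"].any fun x => PySem.Str.isIn x cpu_name) then 6
  else if (["ryzen 3", "i3"].any fun x => PySem.Str.isIn x cpu_name) then 5
  else if (["pentium", "celeron", "athlon"].any fun x => PySem.Str.isIn x cpu_name) then 3
  else if (["atom", "sempron"].any fun x => PySem.Str.isIn x cpu_name) then 2
  else 5

-- ===== PORT B =====
-- the flat CPU_SCORES dict (insertion order; all keys distinct)
def cpuScores : List (String × Int) :=
  [ ("ryzen 9", 10), ("threadripper", 10), ("i9", 10), ("xeon", 10), ("epyc", 10)
  , ("ryzen 7", 8), ("i7", 8)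
  , ("ryzen 5", 6), ("i5", 6)
  , ("ryzen 3", 5), ("i3", 5)
  , ("pentium", 3), ("celeron", 3), ("athlon", 3)
  , ("atom", 2), ("sempron", 2) ]

def rate_cpu_alt (cpu_info : List (String × String)) : Int :=
  let cpu_name := PySem.Str.lower (PySem.Dict.getD (PySem.Dict.mk cpu_info) "brand_raw" "")
  -- max((score for sub, score in CPU_SCORES.items() if sub in cpu_name), default=5)
  match PySem.List.max? ((cpuScores.filter (fun p => PySem.Str.isIn p.1 cpu_name)).map Prod.snd) (fun y => y) with
  | some m => m
  | none => 5

-- ===== PRECONDITION & SPEC =====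
def Spec_rate_cpu (cpu_info : List (String × String)) (out : Int) : Prop := out = rate_cpu_alt cpu_info
instance (cpu_info : List (String × String)) (out : Int) : Decidable (Spec_rate_cpu cpu_info out) := by unfold Spec_rate_cpu; infer_instance

-- ===== CLAIM (what is proved, stated in full; the proofs are below) =====
def Claim_equal_rate_cpu : Prop := ∀ (cpu_info : List (String × String)), Dom_rate_cpu cpu_info → Spec_rate_cpu cpu_info (rate_cpu cpu_info)

-- ===== LEMMAS AND PROOFS =====

-- Python max over Ints: the returned value is THE maximum (tie-break only affects which index).
theorem max_id_eq {l : List Int} {v : Int} (hv : v ∈ l) (hb : ∀ y ∈ l, y ≤ v) :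
    PySem.List.max? l (fun y => y) = some v := by
  cases hmax : PySem.List.max? l (fun y => y) with
  | none =>
      rw [PySem.List.max?_eq_none_iff] at hmax
      subst hmax; cases hv
  | some m =>
      have h1 : m ∈ l := PySem.List.max?_mem hmax
      have h2 := PySem.List.max?_isMax hmax v hv
      have h3 := hb m h1
      simp only [Option.some.injEq]
      omega

-- ===== VERDICT (by name: the statement is the Claim_ definition above) =====

theorem rate_cpu_spec : Claim_equal_rate_cpu := by
  intro cpu_info _
  unfold Spec_rate_cpu rate_cpu rate_cpu_alt
  set n := PySem.Str.lower (PySem.Dict.getD (PySem.Dict.mk cpu_info) "brand_raw" "") with hn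
  clear hn
  dsimp only
  split_ifs with h1 h2 h3 h4 h5 h6
  · simp only [List.any_eq_true, List.mem_cons, List.not_mem_nil, or_false,
      exists_eq_or_imp, exists_eq_left] at h1
    rw [max_id_eq (v := 10)]
    · simp only [List.mem_map, List.mem_filter, cpuScores, List.mem_cons, List.mem_nil_iff, or_false]
      rcases h1 with h | h | h | h | h
      · exact ⟨("ryzen 9", 10), by simpa using h⟩
      · exact ⟨("threadripper", 10), by simpa using h⟩
      · exact ⟨("i9", 10), by simpa using h⟩
      · exact ⟨("xeon", 10), by simpa using h⟩
      · exact ⟨("epyc", 10), by simpa using h⟩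
    · intro y hy
      simp only [List.mem_map, List.mem_filter, cpuScores, List.mem_cons, List.mem_nil_iff, or_false] at hy
      obtain ⟨p, ⟨hmem, hin⟩, rfl⟩ := hy
      rcases hmem with rfl|rfl|rfl|rfl|rfl|rfl|rfl|rfl|rfl|rfl|rfl|rfl|rfl|rfl|rfl|rfl <;> omega
  · simp only [List.any_eq_true, List.mem_cons, List.not_mem_nil, or_false,
      exists_eq_or_imp, exists_eq_left, not_or] at h1 h2
    rw [max_id_eq (v := 8)]
    · simp only [List.mem_map, List.mem_filter, cpuScores, List.mem_cons, List.mem_nil_iff, or_false]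
      rcases h2 with h | h
      · exact ⟨("ryzen 7", 8), by simpa using h⟩
      · exact ⟨("i7", 8), by simpa using h⟩
    · intro y hy
      simp only [List.mem_map, List.mem_filter, cpuScores, List.mem_cons, List.mem_nil_iff, or_false] at hy
      obtain ⟨p, ⟨hmem, hin⟩, rfl⟩ := hy
      rcases hmem with rfl|rfl|rfl|rfl|rfl|rfl|rfl|rfl|rfl|rfl|rfl|rfl|rfl|rfl|rfl|rfl <;> simp_all
  · simp only [List.any_eq_true, List.mem_cons, List.not_mem_nil, or_false,
      exists_eq_or_imp, exists_eq_left, not_or] at h1 h2 h3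
    rw [max_id_eq (v := 6)]
    · simp only [List.mem_map, List.mem_filter, cpuScores, List.mem_cons, List.mem_nil_iff, or_false]
      rcases h3 with h | h
      · exact ⟨("ryzen 5", 6), by simpa using h⟩
      · exact ⟨("i5", 6), by simpa using h⟩
    · intro y hy
      simp only [List.mem_map, List.mem_filter, cpuScores, List.mem_cons, List.mem_nil_iff, or_false] at hy
      obtain ⟨p, ⟨hmem, hin⟩, rfl⟩ := hy
      rcases hmem with rfl|rfl|rfl|rfl|rfl|rfl|rfl|rfl|rfl|rfl|rfl|rfl|rfl|rfl|rfl|rfl <;> simp_all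
  · simp only [List.any_eq_true, List.mem_cons, List.not_mem_nil, or_false,
      exists_eq_or_imp, exists_eq_left, not_or] at h1 h2 h3 h4
    rw [max_id_eq (v := 5)]
    · simp only [List.mem_map, List.mem_filter, cpuScores, List.mem_cons, List.mem_nil_iff, or_false]
      rcases h4 with h | h
      · exact ⟨("ryzen 3", 5), by simpa using h⟩
      · exact ⟨("i3", 5), by simpa using h⟩
    · intro y hy
      simp only [List.mem_map, List.mem_filter, cpuScores, List.mem_cons, List.mem_nil_iff, or_false] at hy
      obtain ⟨p, ⟨hmem, hin⟩, rfl⟩ := hy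
      rcases hmem with rfl|rfl|rfl|rfl|rfl|rfl|rfl|rfl|rfl|rfl|rfl|rfl|rfl|rfl|rfl|rfl <;> simp_all
  · simp only [List.any_eq_true, List.mem_cons, List.not_mem_nil, or_false,
      exists_eq_or_imp, exists_eq_left, not_or] at h1 h2 h3 h4 h5
    rw [max_id_eq (v := 3)]
    · simp only [List.mem_map, List.mem_filter, cpuScores, List.mem_cons, List.mem_nil_iff, or_false]
      rcases h5 with h | h | h
      · exact ⟨("pentium", 3), by simpa using h⟩
      · exact ⟨("celeron", 3), by simpa using h⟩
      · exact ⟨("athlon", 3), by simpa using h⟩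
    · intro y hy
      simp only [List.mem_map, List.mem_filter, cpuScores, List.mem_cons, List.mem_nil_iff, or_false] at hy
      obtain ⟨p, ⟨hmem, hin⟩, rfl⟩ := hy
      rcases hmem with rfl|rfl|rfl|rfl|rfl|rfl|rfl|rfl|rfl|rfl|rfl|rfl|rfl|rfl|rfl|rfl <;> simp_all
  · simp only [List.any_eq_true, List.mem_cons, List.not_mem_nil, or_false,
      exists_eq_or_imp, exists_eq_left, not_or] at h1 h2 h3 h4 h5 h6
    rw [max_id_eq (v := 2)]
    · simp only [List.mem_map, List.mem_filter, cpuScores, List.mem_cons, List.mem_nil_iff, or_false]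
      rcases h6 with h | h
      · exact ⟨("atom", 2), by simpa using h⟩
      · exact ⟨("sempron", 2), by simpa using h⟩
    · intro y hy
      simp only [List.mem_map, List.mem_filter, cpuScores, List.mem_cons, List.mem_nil_iff, or_false] at hy
      obtain ⟨p, ⟨hmem, hin⟩, rfl⟩ := hy
      rcases hmem with rfl|rfl|rfl|rfl|rfl|rfl|rfl|rfl|rfl|rfl|rfl|rfl|rfl|rfl|rfl|rfl <;> simp_all
  · simp only [List.any_eq_true, List.mem_cons, List.not_mem_nil, or_false,
      exists_eq_or_imp, exists_eq_left, not_or] at h1 h2 h3 h4 h5 h6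
    rw [show (cpuScores.filter (fun p => PySem.Str.isIn p.1 n)) = [] by
        simp only [List.filter_eq_nil_iff, cpuScores, List.mem_cons, List.mem_nil_iff, or_false]
        rintro p (rfl|rfl|rfl|rfl|rfl|rfl|rfl|rfl|rfl|rfl|rfl|rfl|rfl|rfl|rfl|rfl) <;>
          simp_all]
    simp [PySem.List.max?]
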